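-- pv_equiv track=rewrite | github.com/HyunJiLim0406/algorithm | 1717-maximum-score-from-removing-substrings/1717-maximum-score-from-removing-substrings.py | calculate
-- ===== SOURCE A (Python) =====
-- def calculate(string: str, key: str, point: int):
--     score = 0
--     stack = []
--     for s in string:
--         if len(stack) > 0:
--             pop = stack.pop()
--             if pop + s == key:
--                 score += point
--                 continue
--             stack.append(pop)
--         stack.append(s)
--     return ''.join(stack), score
-- ===== SOURCE B (Python) =====
-- def calculate(string: str, key: str, point: int):
--     score = 0
--     if len(key) == 2:
--         while key in string:
--             score += string.count(key) * point
--             string = string.replace(key, '')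
--     return string, score
-- ===== Notes on version B (the rewrite author's own statement) =====
-- stated objective: simpler
-- what changed: Replaces the one-pass surviving-character stack with a fixpoint loop that repeatedly deletes all non-overlapping occurrences of the 2-char key via str.replace, counting them for the score; correctness rests on confluence of the pair-deletion rewrite (proved in Lean).
import Mathlib
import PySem

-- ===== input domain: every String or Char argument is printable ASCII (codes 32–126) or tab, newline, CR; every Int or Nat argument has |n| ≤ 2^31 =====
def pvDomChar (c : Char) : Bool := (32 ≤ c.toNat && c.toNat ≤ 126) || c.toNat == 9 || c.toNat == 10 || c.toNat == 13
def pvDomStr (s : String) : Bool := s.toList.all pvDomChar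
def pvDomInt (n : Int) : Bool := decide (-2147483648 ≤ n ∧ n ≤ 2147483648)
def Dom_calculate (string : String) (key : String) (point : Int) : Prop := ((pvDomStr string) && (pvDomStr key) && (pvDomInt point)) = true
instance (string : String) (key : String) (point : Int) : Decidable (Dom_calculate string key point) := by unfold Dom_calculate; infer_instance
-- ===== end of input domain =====

-- B replaces A's one-pass surviving-character stack by a fixpoint loop deleting all
-- non-overlapping occurrences of the 2-char key per pass (str.replace/str.count);
-- equal by confluence of the pair-deletion rewrite, proved below.

-- ===== PORT A =====
-- the Python stack is held in reverse: cons = stack.append(x) at the end, head = stack.pop()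
def calcStep (key : List Char) (point : Int) (st : Int × List Char) (s : Char) : Int × List Char :=
  match st with
  | (score, stack) =>
    match stack with
    | [] => (score, s :: stack)                        -- len(stack) == 0: just append s
    | pop :: rest =>                                   -- pop = stack.pop()
        if [pop, s] = key then (score + point, rest)   -- pop + s == key: score += point; continue
        else (score, s :: pop :: rest)                 -- re-append pop, then append s

def calculate (string : String) (key : String) (point : Int) : String × Int :=
  let r := string.toList.foldl (calcStep key.toList point) (0, [])
  (PySem.Str.join "" (r.2.reverse.map (fun c => String.ofList [c])), r.1)   -- ''.join(stack)

-- ===== PORT B =====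
-- fuel = initial length: each loop pass deletes ≥ 2 chars, so the fuel is never exhausted
def calcLoop (key : String) (point : Int) : Nat → String → Int → String × Int
  | 0, string, score => (string, score)
  | fuel + 1, string, score =>
      if PySem.Str.isIn key string then                -- while key in string
        calcLoop key point fuel (PySem.Str.replace string key "")
          (score + (PySem.Str.count string key : Int) * point)
      else (string, score)

def calculate_alt (string : String) (key : String) (point : Int) : String × Int :=
  if PySem.Str.len key = 2 then calcLoop key point string.toList.length string 0
  else (string, 0)

-- ===== PRECONDITION & SPEC =====
def Spec_calculate (string : String) (key : String) (point : Int) (out : String × Int) : Prop := out = calculate_alt string key point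
instance (string : String) (key : String) (point : Int) (out : String × Int) : Decidable (Spec_calculate string key point out) := by unfold Spec_calculate; infer_instance

-- ===== CLAIM (what is proved, stated in full; the proofs are below) =====
def Claim_equal_calculate : Prop := ∀ (string : String) (key : String) (point : Int), Dom_calculate string key point → Spec_calculate string key point (calculate string key point)

-- ===== LEMMAS AND PROOFS =====

-- the stack never contains the (reversed) key pair adjacently: k2 directly followed by k1
def noAdj (k1 k2 : Char) : List Char → Bool
  | a :: b :: r => !(a = k2 && b = k1) && noAdj k1 k2 (b :: r)
  | _ => true

theorem noAdj_tail (k1 k2 a : Char) (r : List Char) (h : noAdj k1 k2 (a :: r) = true) :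
    noAdj k1 k2 r = true := by
  cases r with
  | nil => rfl
  | cons b t => simp only [noAdj, Bool.and_eq_true] at h; exact h.2

theorem calcStep_shift (key : List Char) (point sc d : Int) (S : List Char) (c : Char) :
    calcStep key point (sc + d, S) c
      = ((calcStep key point (sc, S) c).1 + d, (calcStep key point (sc, S) c).2) := by
  cases S with
  | nil => rfl
  | cons p r =>
    by_cases h : [p, c] = key
    · simp [calcStep, h]; ring
    · simp [calcStep, h]

theorem foldl_shift (key : List Char) (point : Int) (l : List Char) :
    ∀ (sc d : Int) (S : List Char),
      List.foldl (calcStep key point) (sc + d, S) l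
        = ((List.foldl (calcStep key point) (sc, S) l).1 + d,
           (List.foldl (calcStep key point) (sc, S) l).2) := by
  induction l with
  | nil => intro sc d S; rfl
  | cons c t ih =>
    intro sc d S
    simp only [List.foldl_cons, calcStep_shift key point sc d S c]
    exact ih _ d _

theorem noAdj_step (k1 k2 : Char) (point sc : Int) (S : List Char) (c : Char)
    (h : noAdj k1 k2 S = true) :
    noAdj k1 k2 (calcStep [k1, k2] point (sc, S) c).2 = true := by
  cases S with
  | nil => rfl
  | cons p r =>
    by_cases hpc : [p, c] = [k1, k2]
    · simpa [calcStep, hpc] using noAdj_tail k1 k2 p r h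
    · simp only [calcStep, if_neg hpc]
      simp only [noAdj, Bool.and_eq_true, Bool.not_eq_true']
      refine ⟨?_, h⟩
      simp only [List.cons.injEq, and_true] at hpc
      by_cases h1 : c = k2 <;> by_cases h2 : p = k1 <;> simp_all

-- deleting one occurrence of the key pair just pays one point: the two chars cancel on the stack
theorem insert_pair (k1 k2 : Char) (point sc : Int) (S : List Char)
    (h : noAdj k1 k2 S = true) :
    calcStep [k1,k2] point (calcStep [k1,k2] point (sc, S) k1) k2 = (sc + point, S) := by
  cases S with
  | nil => simp [calcStep]
  | cons p r =>
    by_cases hpc : [p, k1] = [k1, k2]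
    · simp only [List.cons.injEq, and_true] at hpc
      obtain ⟨hp, hk⟩ := hpc
      subst hk; subst hp
      cases r with
      | nil => simp [calcStep]
      | cons q r' =>
        have hq : ¬ (q = p) := by
          simp only [noAdj, Bool.and_eq_true, Bool.not_eq_true', Bool.and_eq_false_iff,
            decide_eq_false_iff_not] at h
          rcases h.1 with h1 | h1
          · exact absurd trivial h1
          · exact h1
        simp [calcStep, hq]
    · simp [calcStep, hpc]

theorem count_go_acc (sub : List Char) : ∀ (fuel : Nat) (l : List Char) (acc : Nat),
    PySem.Chars.count.go sub fuel l acc = acc + PySem.Chars.count.go sub fuel l 0 := by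
  intro fuel
  induction fuel with
  | zero => intro l acc; simp [PySem.Chars.count.go]
  | succ n ih =>
    intro l acc
    cases l with
    | nil => simp [PySem.Chars.count.go]
    | cons c t =>
      by_cases hp : sub.isPrefixOf (c :: t) = true
      · simp only [PySem.Chars.count.go, hp, if_true]
        rw [ih _ (acc + 1), ih _ 1]
        omega
      · simp only [PySem.Chars.count.go, hp]
        exact ih t acc

theorem replace_go_acc (old : List Char) : ∀ (fuel : Nat) (l acc : List Char),
    PySem.Chars.replace.go old [] fuel l acc = acc.reverse ++ PySem.Chars.replace.go old [] fuel l [] := by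
  intro fuel
  induction fuel with
  | zero => intro l acc; simp [PySem.Chars.replace.go]
  | succ n ih =>
    intro l acc
    cases l with
    | nil => simp [PySem.Chars.replace.go]
    | cons c t =>
      by_cases hp : old.isPrefixOf (c :: t) = true
      · simp only [PySem.Chars.replace.go, hp, if_true, List.reverse_nil, List.nil_append,
          List.append_nil]
        exact ih _ acc
      · simp only [PySem.Chars.replace.go, hp]
        rw [ih t (c :: acc), ih t [c]]
        simp

-- one replace pass: the stack fold of the string equals the fold of the pass's output,
-- shifted by (number of occurrences deleted) * point
theorem pass (k1 k2 : Char) (point : Int) : ∀ (fuel : Nat) (l : List Char), l.length ≤ fuel →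
    ∀ (sc : Int) (S : List Char), noAdj k1 k2 S = true →
      List.foldl (calcStep [k1,k2] point) (sc, S) l
        = List.foldl (calcStep [k1,k2] point)
            (sc + (PySem.Chars.count.go [k1,k2] fuel l 0 : Int) * point, S)
            (PySem.Chars.replace.go [k1,k2] [] fuel l []) := by
  intro fuel
  induction fuel with
  | zero =>
    intro l hl sc S h
    have hn : l = [] := List.eq_nil_of_length_eq_zero (by omega)
    subst hn; simp [PySem.Chars.count.go, PySem.Chars.replace.go]
  | succ n ih =>
    intro l hl sc S h
    cases l with
    | nil => simp [PySem.Chars.count.go, PySem.Chars.replace.go]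
    | cons c t =>
      by_cases hp : List.isPrefixOf [k1, k2] (c :: t) = true
      · obtain ⟨u, hu⟩ := List.isPrefixOf_iff_prefix.mp hp
        simp only [List.cons_append, List.nil_append, List.cons.injEq] at hu
        obtain ⟨hc, ht⟩ := hu
        subst hc; subst ht
        simp only [PySem.Chars.count.go, PySem.Chars.replace.go, hp, if_true]
        simp only [List.length_cons, List.drop_succ_cons, List.drop_zero, List.reverse_nil,
          List.nil_append, List.length_nil]
        rw [count_go_acc _ n _ 1]
        simp only [List.foldl_cons]
        rw [insert_pair k1 k2 point sc S h]
        rw [ih u (by simp at hl; omega) (sc + point) S h]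
        congr 1
        simp only [Prod.mk.injEq]
        exact ⟨by push_cast; ring, trivial⟩
      · rw [Bool.not_eq_true] at hp
        simp only [PySem.Chars.count.go, PySem.Chars.replace.go, hp, Bool.false_eq_true,
          if_false]
        rw [replace_go_acc _ n t [c]]
        simp only [List.reverse_cons, List.reverse_nil, List.nil_append, List.singleton_append]
        simp only [List.foldl_cons]
        rcases hstep : calcStep [k1, k2] point (sc, S) c with ⟨sc1, S1⟩
        have hna : noAdj k1 k2 S1 = true := by
          have := noAdj_step k1 k2 point sc S c h
          rw [hstep] at this; exact this
        have hsh := calcStep_shift [k1, k2] point sc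
          ((PySem.Chars.count.go [k1, k2] n t 0 : Int) * point) S c
        rw [hstep] at hsh
        rw [hsh]
        exact ih t (by simp at hl; omega) sc1 S1 hna

-- a string without an occurrence of the key just piles up on the stack
theorem nf (k1 k2 : Char) (point : Int) : ∀ (l : List Char) (sc : Int) (S : List Char),
    ¬ ([k1,k2] <:+: l) →
    (∀ c t, l = c :: t → ∀ p r, S = p :: r → [p, c] ≠ [k1, k2]) →
    List.foldl (calcStep [k1,k2] point) (sc, S) l = (sc, l.reverse ++ S) := by
  intro l
  induction l with
  | nil => intro sc S _ _; rfl
  | cons c t ih =>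
    intro sc S hinf hhead
    simp only [List.foldl_cons]
    have hstep : calcStep [k1,k2] point (sc, S) c = (sc, c :: S) := by
      cases S with
      | nil => rfl
      | cons p r =>
        have hne : [p, c] ≠ [k1, k2] := hhead c t rfl p r rfl
        simp [calcStep, hne]
    rw [hstep]
    have hinf' : ¬ ([k1,k2] <:+: t) := fun hx => hinf (List.infix_cons_iff.mpr (Or.inr hx))
    have hhead' : ∀ d t', t = d :: t' → ∀ p r, (c :: S) = p :: r → [p, d] ≠ [k1, k2] := by
      intro d t' ht p r hpr hcontr
      injection hpr with h1 _
      subst h1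
      apply hinf
      rw [ht]
      refine List.infix_cons_iff.mpr (Or.inl ?_)
      rw [← hcontr]
      exact ⟨t', rfl⟩
    rw [ih sc (c :: S) hinf' hhead']
    simp

theorem replace_go_length (k1 k2 : Char) : ∀ (fuel : Nat) (l : List Char), l.length ≤ fuel →
    (PySem.Chars.replace.go [k1,k2] [] fuel l []).length
      + 2 * PySem.Chars.count.go [k1,k2] fuel l 0 = l.length := by
  intro fuel
  induction fuel with
  | zero =>
    intro l hl
    have hn : l = [] := List.eq_nil_of_length_eq_zero (by omega)
    subst hn; simp [PySem.Chars.count.go, PySem.Chars.replace.go]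
  | succ n ih =>
    intro l hl
    cases l with
    | nil => simp [PySem.Chars.count.go, PySem.Chars.replace.go]
    | cons c t =>
      by_cases hp : List.isPrefixOf [k1, k2] (c :: t) = true
      · obtain ⟨u, hu⟩ := List.isPrefixOf_iff_prefix.mp hp
        simp only [List.cons_append, List.nil_append, List.cons.injEq] at hu
        obtain ⟨hc, ht⟩ := hu
        subst hc; subst ht
        simp only [PySem.Chars.count.go, PySem.Chars.replace.go, hp, if_true]
        simp only [List.length_cons, List.drop_succ_cons, List.drop_zero, List.reverse_nil,
          List.nil_append, List.length_nil]
        rw [count_go_acc _ n _ 1]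
        have := ih u (by simp at hl; omega)
        omega
      · rw [Bool.not_eq_true] at hp
        simp only [PySem.Chars.count.go, PySem.Chars.replace.go, hp, Bool.false_eq_true,
          if_false]
        rw [replace_go_acc _ n t [c]]
        have := ih t (by simp at hl; omega)
        simp only [List.reverse_cons, List.reverse_nil, List.nil_append, List.singleton_append,
          List.length_cons]
        omega

theorem count_pos_of_infix (k1 k2 : Char) : ∀ (fuel : Nat) (l : List Char), l.length ≤ fuel →
    [k1,k2] <:+: l → 1 ≤ PySem.Chars.count.go [k1,k2] fuel l 0 := by
  intro fuel
  induction fuel with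
  | zero =>
    intro l hl hinf
    have hn : l = [] := List.eq_nil_of_length_eq_zero (by omega)
    subst hn; simp at hinf
  | succ n ih =>
    intro l hl hinf
    cases l with
    | nil => simp at hinf
    | cons c t =>
      by_cases hp : List.isPrefixOf [k1, k2] (c :: t) = true
      · simp only [PySem.Chars.count.go, hp, if_true]
        rw [count_go_acc _ n _ 1]
        omega
      · rw [Bool.not_eq_true] at hp
        simp only [PySem.Chars.count.go, hp, Bool.false_eq_true, if_false]
        rcases List.infix_cons_iff.mp hinf with hpre | hinf'
        · exact absurd (List.isPrefixOf_iff_prefix.mpr hpre) (by simp [hp])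
        · exact ih t (by simp at hl; omega) hinf' 

-- a key of length ≠ 2 never matches pop + s, so the stack just accumulates everything
theorem nopair (key : List Char) (hk : key.length ≠ 2) (point : Int) :
    ∀ (l : List Char) (sc : Int) (S : List Char),
      List.foldl (calcStep key point) (sc, S) l = (sc, l.reverse ++ S) := by
  intro l
  induction l with
  | nil => intro sc S; rfl
  | cons c t ih =>
    intro sc S
    simp only [List.foldl_cons]
    have hstep : calcStep key point (sc, S) c = (sc, c :: S) := by
      cases S with
      | nil => rfl
      | cons p r =>
        have hne : [p, c] ≠ key := by
          intro hc
          exact hk (by rw [← hc]; rfl)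
        simp [calcStep, hne]
    rw [hstep, ih sc (c :: S)]
    simp

theorem loopL (k1 k2 : Char) (point : Int) : ∀ (fuel : Nat) (s ky : String) (sc : Int),
    ky.toList = [k1,k2] → s.toList.length ≤ 2 * fuel →
    calcLoop ky point fuel s sc
      = (String.ofList ((List.foldl (calcStep [k1,k2] point) (0, []) s.toList).2.reverse),
         sc + (List.foldl (calcStep [k1,k2] point) (0, []) s.toList).1) := by
  intro fuel
  induction fuel with
  | zero =>
    intro s ky sc hky hl
    have hn : s.toList = [] := List.eq_nil_of_length_eq_zero (by omega)
    simp only [calcLoop, hn, List.foldl_nil, List.reverse_nil]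
    rw [← hn, String.ofList_toList]
    simp
  | succ n ih =>
    intro s ky sc hky hl
    by_cases h : PySem.Str.isIn ky s = true
    · have hinf : [k1,k2] <:+: s.toList := by
        rw [PySem.Str.isIn_eq, hky] at h
        exact (PySem.Chars.isIn_iff_infix _ _).mp h
      have hrep : (PySem.Str.replace s ky "").toList
          = PySem.Chars.replace.go [k1,k2] [] s.toList.length s.toList [] := by
        rw [PySem.Str.toList_replace, hky]
        simp [PySem.Chars.replace]
      have hcnt : PySem.Str.count s ky
          = PySem.Chars.count.go [k1,k2] s.toList.length s.toList 0 := by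
        rw [PySem.Str.count_eq, hky]
        simp [PySem.Chars.count]
      have hlen := replace_go_length k1 k2 s.toList.length s.toList (le_refl _)
      have hcp := count_pos_of_infix k1 k2 s.toList.length s.toList (le_refl _) hinf
      simp only [calcLoop, h, if_true]
      rw [ih (PySem.Str.replace s ky "") ky
        (sc + (PySem.Str.count s ky : Int) * point) hky (by rw [hrep]; omega)]
      have hpass := pass k1 k2 point s.toList.length s.toList (le_refl _) 0 [] rfl
      have hsh := foldl_shift [k1,k2] point
        (PySem.Chars.replace.go [k1,k2] [] s.toList.length s.toList []) 0
        ((PySem.Chars.count.go [k1,k2] s.toList.length s.toList 0 : Int) * point) []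
      rw [hsh] at hpass
      rw [hrep, hcnt, hpass]
      simp only [Prod.mk.injEq]
      refine ⟨trivial, by ring⟩
    · have hninf : ¬ ([k1,k2] <:+: s.toList) := by
        rw [PySem.Str.isIn_eq, hky] at h
        exact (PySem.Chars.isIn_eq_false_iff _ _).mp (by revert h; cases PySem.Chars.isIn [k1,k2] s.toList <;> simp)
      simp only [calcLoop, h]
      rw [nf k1 k2 point s.toList 0 [] hninf (by intro c t _ p r hpr; cases hpr)]
      simp only [List.append_nil, List.reverse_reverse]
      rw [String.ofList_toList]
      simp

theorem join_singletons (cs : List Char) :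
    PySem.Str.join "" (cs.map (fun c => String.ofList [c])) = String.ofList cs := by
  have h : (PySem.Str.join "" (cs.map (fun c => String.ofList [c]))).toList = cs := by
    rw [PySem.Str.toList_join, List.map_map]
    have hc : (String.toList ∘ fun c => String.ofList [c]) = fun c => [c] := by
      funext c; simp [String.toList_ofList]
    rw [hc]
    simp [PySem.Chars.join_nil_singletons cs]
  calc PySem.Str.join "" (cs.map (fun c => String.ofList [c]))
      = String.ofList (PySem.Str.join "" (cs.map (fun c => String.ofList [c]))).toList := by
        rw [String.ofList_toList]
    _ = String.ofList cs := by rw [h]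

-- ===== VERDICT (by name: the statement is the Claim_ definition above) =====
theorem calculate_spec : Claim_equal_calculate := by
  intro string key point _
  unfold Spec_calculate
  show calculate string key point = calculate_alt string key point
  simp only [calculate, calculate_alt]
  by_cases hk : PySem.Str.len key = 2
  · rw [if_pos hk]
    have hkl : key.toList.length = 2 := by
      rw [PySem.Str.len_eq] at hk; exact_mod_cast hk
    obtain ⟨k1, k2, hky⟩ := List.length_eq_two.mp hkl
    rw [loopL k1 k2 point string.toList.length string key 0 hky (by omega), hky]
    rw [join_singletons]
    simp
  · rw [if_neg hk]
    have hkl : key.toList.length ≠ 2 := by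
      rw [PySem.Str.len_eq] at hk
      intro hc; exact hk (by exact_mod_cast hc)
    rw [nopair key.toList hkl point string.toList 0 []]
    simp only [List.append_nil, List.reverse_reverse]
    rw [join_singletons, String.ofList_toList]
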